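-- pv_equiv track=rewrite | github.com/betina17/University | First Year/Semester 1/Fundamentals of Programming/lab assignments/a4/lab4p13.py | generate_consecutive_subsequences_iterative_backtracking
-- ===== SOURCE A (Python) =====
-- from copy import deepcopy
--
-- def has_mountain_aspect(subsequence):
--     if len(subsequence) < 3:
--         return False
--
--     peak_index = subsequence.index(max(subsequence))
--     # Check if peak is at either end of the subsequence
--     if peak_index == 0 or peak_index == len(subsequence) - 1:
--         return False
--
--     # Check for strictly increasing then decreasing pattern
--     for i in range(1, peak_index):
--         if subsequence[i] <= subsequence[i - 1]:
--             return False
--     for i in range(peak_index + 1, len(subsequence)):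
--         if subsequence[i] >= subsequence[i - 1]:
--             return False
--
--     return True
--
-- def generate_consecutive_subsequences_iterative_backtracking(sequence):
--     stack = []
--     results=[]
--     for i in range(len(sequence)):
--         subsequence = []
--         subsequence.append(sequence[i])
--         for j in range(i+1, len(sequence)):
--             subsequence.append(sequence[j])
--             if(len(subsequence)>=3):
--                 stack.append(deepcopy(subsequence))
--
--     for k in range(len(stack)):
--         if has_mountain_aspect(stack[k]):
--             results.append(stack[k])
--
--     return results
-- ===== SOURCE B (Python) =====
-- def generate_consecutive_subsequences_iterative_backtracking(sequence):
--     # Run-based scan: for each start, climb the strictly increasing run to its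
--     # peak, then walk down the strictly decreasing run, emitting each mountain
--     # subarray as soon as it is complete (same start-then-end order as A).
--     n = len(sequence)
--     results = []
--     for i in range(n):
--         p = i
--         while p + 1 < n and sequence[p] < sequence[p + 1]:
--             p += 1
--         if p == i:
--             continue  # no ascent from this start
--         j = p
--         while j + 1 < n and sequence[j] > sequence[j + 1]:
--             j += 1
--             results.append(sequence[i:j + 1])
--     return results
-- ===== Notes on version B (the rewrite author's own statement) =====
-- stated objective: faster
-- what changed: Instead of materialising every length>=3 subarray and testing each with a max/index-based mountain check, B climbs the strictly increasing run from each start and emits the mountain subarrays directly while walking the strictly decreasing run, in the same (start,end) order.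
import Mathlib
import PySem

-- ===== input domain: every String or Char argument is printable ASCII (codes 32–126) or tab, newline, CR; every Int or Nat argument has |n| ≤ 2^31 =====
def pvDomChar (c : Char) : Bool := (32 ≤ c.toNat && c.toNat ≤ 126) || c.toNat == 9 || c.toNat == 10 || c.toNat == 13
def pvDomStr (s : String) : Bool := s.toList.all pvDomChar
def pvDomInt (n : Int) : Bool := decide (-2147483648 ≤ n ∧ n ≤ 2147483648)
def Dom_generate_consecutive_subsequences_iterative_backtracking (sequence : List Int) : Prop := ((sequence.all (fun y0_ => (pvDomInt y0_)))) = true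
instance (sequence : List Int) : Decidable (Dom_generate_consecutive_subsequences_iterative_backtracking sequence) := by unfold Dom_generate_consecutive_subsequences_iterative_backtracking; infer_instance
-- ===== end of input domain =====

-- B replaces A's enumerate-all-subarrays-then-test pass (O(n^3) subarray copies plus a
-- multi-pass max/index mountain test on each) with a run-based scan that climbs the strict
-- ascent from each start and emits mountains directly along the strict descent; objective: faster.

-- ===== PORT A =====
-- literal port of has_mountain_aspect; all loop indices lie in range, so pyGetD with default 0 is exact
def has_mountain_aspect (subsequence : List Int) : Bool :=
  if subsequence.length < 3 then false
  else
    match PySem.List.max? subsequence (fun x => x) with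
    | none => false   -- unreachable: the list is nonempty here
    | some m =>
      match PySem.List.index? subsequence m with
      | none => false -- unreachable: m is an element of the list
      | some peak_index =>
        if peak_index = 0 ∨ peak_index = subsequence.length - 1 then false
        else
          -- for i in range(1, peak_index): if subsequence[i] <= subsequence[i-1]: return False
          ((PySem.List.pyRange 1 (peak_index : Int) 1).all (fun i =>
              !decide (PySem.List.pyGetD subsequence i 0 ≤ PySem.List.pyGetD subsequence (i - 1) 0))) &&
          -- for i in range(peak_index+1, len(subsequence)): if subsequence[i] >= subsequence[i-1]: return False
          ((PySem.List.pyRange ((peak_index : Int) + 1) (PySem.List.len subsequence) 1).all (fun i =>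
              !decide (PySem.List.pyGetD subsequence i 0 ≥ PySem.List.pyGetD subsequence (i - 1) 0)))

def generate_consecutive_subsequences_iterative_backtracking (sequence : List Int) : List (List Int) :=
  let stack : List (List Int) :=
    (PySem.List.pyRange 0 (PySem.List.len sequence) 1).foldl (fun stack i =>
      let subsequence : List Int := [PySem.List.pyGetD sequence i 0]
      ((PySem.List.pyRange (i + 1) (PySem.List.len sequence) 1).foldl
        (fun (st : List Int × List (List Int)) j =>
          let sub := st.1 ++ [PySem.List.pyGetD sequence j 0]
          (sub, if 3 ≤ sub.length then st.2 ++ [sub] else st.2))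
        (subsequence, stack)).2) []
  (PySem.List.pyRange 0 (PySem.List.len stack) 1).foldl (fun results k =>
    let item := PySem.List.pyGetD stack k []
    if has_mountain_aspect item then results ++ [item] else results) []

-- ===== PORT B =====
-- while p+1 < n and sequence[p] < sequence[p+1]: p += 1   (indices in range, getD is exact)
def pvClimb (sequence : List Int) (n p : Nat) : Nat :=
  if h : p + 1 < n ∧ sequence.getD p 0 < sequence.getD (p + 1) 0 then
    pvClimb sequence n (p + 1)
  else p
  termination_by n - p
  decreasing_by omega

-- while j+1 < n and sequence[j] > sequence[j+1]: j += 1; results.append(sequence[i:j+1])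
-- (the slice has nonnegative in-range bounds, so drop/take is exact: PySem.List.slice_natCast)
def pvDescend (sequence : List Int) (n i j : Nat) (results : List (List Int)) : List (List Int) :=
  if _h : j + 1 < n ∧ sequence.getD (j + 1) 0 < sequence.getD j 0 then
    pvDescend sequence n i (j + 1) (results ++ [(sequence.drop i).take (j + 2 - i)])
  else results
  termination_by n - j
  decreasing_by omega

def generate_consecutive_subsequences_iterative_backtracking_alt (sequence : List Int) : List (List Int) :=
  let n := sequence.length
  (List.range n).foldl (fun results i =>
    let p := pvClimb sequence n i
    if p = i then results
    else pvDescend sequence n i p results) []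

-- ===== PRECONDITION & SPEC =====
def Spec_generate_consecutive_subsequences_iterative_backtracking (sequence : List Int) (out : List (List Int)) : Prop := out = generate_consecutive_subsequences_iterative_backtracking_alt sequence
instance (sequence : List Int) (out : List (List Int)) : Decidable (Spec_generate_consecutive_subsequences_iterative_backtracking sequence out) := by unfold Spec_generate_consecutive_subsequences_iterative_backtracking; infer_instance

-- ===== CLAIM (what is proved, stated in full; the proofs are below) =====
def Claim_equal_generate_consecutive_subsequences_iterative_backtracking : Prop := ∀ (sequence : List Int), Dom_generate_consecutive_subsequences_iterative_backtracking sequence → Spec_generate_consecutive_subsequences_iterative_backtracking sequence (generate_consecutive_subsequences_iterative_backtracking sequence)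

-- ===== LEMMAS AND PROOFS =====

-- the strictly-decreasing run limit starting at j (proof-side mirror of pvDescend's stopping index)
def pvDscLim (sequence : List Int) (n j : Nat) : Nat :=
  if h : j + 1 < n ∧ sequence.getD (j + 1) 0 < sequence.getD j 0 then
    pvDscLim sequence n (j + 1)
  else j
  termination_by n - j
  decreasing_by omega

-- A's candidate subarrays for start i, in inner-loop order
def pvCand (s : List Int) (i : Nat) : List (List Int) :=
  (List.range' (i + 2) (s.length - (i + 2))).map (fun j => (s.drop i).take (j + 1 - i))

theorem pvTakeDropLen (s : List Int) (i m : Nat) (h : i + m ≤ s.length) :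
    ((s.drop i).take m).length = m := by
  simp [List.length_take, List.length_drop]; omega

theorem pvTakeDropGetD (s : List Int) (i m k : Nat) (hk : k < m) (_h : i + m ≤ s.length) :
    ((s.drop i).take m).getD k 0 = s.getD (i + k) 0 := by
  rw [List.getD_eq_getElem?_getD, List.getD_eq_getElem?_getD, List.getElem?_take_of_lt hk,
      List.getElem?_drop]

theorem pvClimb_ge (s : List Int) (n i : Nat) : i ≤ pvClimb s n i := by
  fun_induction pvClimb with
  | case1 p _ ih => omega
  | case2 p _ => omega
theorem pvClimb_lt (s : List Int) (n i : Nat) (h : i < n) : pvClimb s n i < n := by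
  fun_induction pvClimb with
  | case1 p hc ih => exact ih (by omega)
  | case2 p hc => omega
theorem pvClimb_inc (s : List Int) (n i : Nat) :
    ∀ k, i ≤ k → k < pvClimb s n i → s.getD k 0 < s.getD (k + 1) 0 := by
  fun_induction pvClimb with
  | case1 p hc ih =>
    intro k hk1 hk2
    rcases Nat.eq_or_lt_of_le hk1 with rfl | h
    · exact hc.2
    · exact ih k h hk2
  | case2 p hc => intro k h1 h2; omega

theorem pvClimb_ge_of_inc (s : List Int) (n i m : Nat) (him : i ≤ m) (hmn : m < n)
    (hinc : ∀ k, i ≤ k → k < m → s.getD k 0 < s.getD (k + 1) 0) : m ≤ pvClimb s n i := by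
  fun_induction pvClimb generalizing m with
  | case1 p hc ih =>
    rcases Nat.lt_or_ge p m with h | h
    · exact ih m h hmn (fun k hk1 hk2 => hinc k (by omega) hk2)
    · exact le_trans h (le_trans (Nat.le_succ p) (pvClimb_ge s n (p + 1)))
  | case2 p hc =>
    by_contra hlt
    exact hc ⟨by omega, hinc p (le_refl p) (by omega)⟩
theorem pvClimb_unique (s : List Int) (n i m : Nat) (him : i ≤ m) (hmn : m < n)
    (hinc : ∀ k, i ≤ k → k < m → s.getD k 0 < s.getD (k + 1) 0)
    (hstop : m + 1 < n → ¬ s.getD m 0 < s.getD (m + 1) 0) : pvClimb s n i = m := by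
  have h1 := pvClimb_ge_of_inc s n i m him hmn hinc
  by_contra hne
  have hm : m < pvClimb s n i := by omega
  have := pvClimb_inc s n i m (by omega) hm
  exact hstop (by have := pvClimb_lt s n i (by omega); omega) this

theorem pvDscLim_ge (s : List Int) (n j : Nat) : j ≤ pvDscLim s n j := by
  fun_induction pvDscLim with
  | case1 p _ ih => omega
  | case2 p _ => omega
theorem pvDscLim_lt (s : List Int) (n j : Nat) (h : j < n) : pvDscLim s n j < n := by
  fun_induction pvDscLim with
  | case1 p hc ih => exact ih (by omega)
  | case2 p hc => omega
theorem pvDscLim_dec (s : List Int) (n j : Nat) :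
    ∀ k, j ≤ k → k < pvDscLim s n j → s.getD (k + 1) 0 < s.getD k 0 := by
  fun_induction pvDscLim with
  | case1 p hc ih =>
    intro k hk1 hk2
    rcases Nat.eq_or_lt_of_le hk1 with rfl | h
    · exact hc.2
    · exact ih k h hk2
  | case2 p hc => intro k h1 h2; omega
theorem pvDscLim_ge_of_dec (s : List Int) (n j m : Nat) (hjm : j ≤ m) (hmn : m < n)
    (hdec : ∀ k, j ≤ k → k < m → s.getD (k + 1) 0 < s.getD k 0) : m ≤ pvDscLim s n j := by
  fun_induction pvDscLim generalizing m with
  | case1 p hc ih =>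
    rcases Nat.lt_or_ge p m with h | h
    · exact ih m h hmn (fun k hk1 hk2 => hdec k (by omega) hk2)
    · exact le_trans h (le_trans (Nat.le_succ p) (pvDscLim_ge s n (p + 1)))
  | case2 p hc =>
    by_contra hlt
    exact hc ⟨by omega, hdec p (le_refl p) (by omega)⟩

theorem pvDscLim_eq_self (s : List Int) (n j : Nat)
    (h : ¬ (j + 1 < n ∧ s.getD (j + 1) 0 < s.getD j 0)) : pvDscLim s n j = j := by
  rw [pvDscLim, dif_neg h]

theorem pvDscLim_eq_succ (s : List Int) (n j : Nat)
    (h : j + 1 < n ∧ s.getD (j + 1) 0 < s.getD j 0) : pvDscLim s n j = pvDscLim s n (j + 1) := by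
  rw [pvDscLim, dif_pos h]

theorem pvDescend_spec (s : List Int) (n i j : Nat) (res : List (List Int)) :
    pvDescend s n i j res
      = res ++ (List.range' (j + 1) (pvDscLim s n j - j)).map (fun j' => (s.drop i).take (j' + 1 - i)) := by
  fun_induction pvDescend with
  | case1 p res hc ih =>
    rw [ih, pvDscLim_eq_succ s n p hc]
    have hge : p + 1 ≤ pvDscLim s n (p + 1) := pvDscLim_ge s n (p + 1)
    have hcount : pvDscLim s n (p + 1) - p = (pvDscLim s n (p + 1) - (p + 1)) + 1 := by omega
    rw [hcount, List.range'_succ, List.map_cons, List.append_assoc]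
    simp
  | case2 p res hc =>
    rw [pvDscLim_eq_self s n p hc]
    simp

-- strict ascent chains to a strict bound
theorem pvIncChain (s : List Int) (i u : Nat)
    (h : ∀ k, i ≤ k → k < u → s.getD k 0 < s.getD (k + 1) 0) :
    ∀ k, i ≤ k → k < u → s.getD k 0 < s.getD u 0 := by
  induction u with
  | zero => intro k _ hk; omega
  | succ v ih =>
    intro k hk1 hk2
    rcases Nat.lt_or_ge k v with hkv | hkv
    · exact lt_trans (ih (fun k a b => h k a (by omega)) k hk1 hkv) (h v (by omega) (by omega))
    · have : k = v := by omega
      subst this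
      exact h k hk1 (by omega)
theorem pvDecChain (s : List Int) (u j : Nat)
    (h : ∀ k, u ≤ k → k < j → s.getD (k + 1) 0 < s.getD k 0) :
    ∀ l, u < l → l ≤ j → s.getD l 0 < s.getD u 0 := by
  intro l
  induction l with
  | zero => omega
  | succ v ih =>
    intro hv1 hv2
    rcases Nat.lt_or_ge u v with huv | huv
    · exact lt_trans (h v (by omega) (by omega)) (ih huv (by omega))
    · have : v = u := by omega
      subst this
      exact h v (le_refl v) (by omega)

-- the core characterisation of A's mountain test on the subarray s[i:j+1]
theorem pvHmIff (s : List Int) (i j : Nat) (hij : i + 2 ≤ j) (hj : j < s.length) :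
    has_mountain_aspect ((s.drop i).take (j + 1 - i)) = true
      ↔ (i < pvClimb s s.length i ∧ pvClimb s s.length i < j
          ∧ j ≤ pvDscLim s s.length (pvClimb s s.length i)) := by
  set n := s.length with hn
  set m := j + 1 - i with hmdef
  set l := (s.drop i).take m with hldef
  set u := pvClimb s n i with hudef
  have him : i + m ≤ n := by omega
  have hm3 : 3 ≤ m := by omega
  have hlen : l.length = m := pvTakeDropLen s i m him
  have hget : ∀ k, k < m → l.getD k 0 = s.getD (i + k) 0 := fun k hk => pvTakeDropGetD s i m k hk him
  rcases hM : PySem.List.max? l (fun x => x) with _ | M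
  · exfalso
    rw [PySem.List.max?_eq_none_iff] at hM
    rw [hM] at hlen
    simp at hlen
    omega
  have hMmem : M ∈ l := PySem.List.max?_mem hM
  have hMmax : ∀ y ∈ l, y ≤ M := fun y hy => PySem.List.max?_isMax hM y hy
  rcases hq : PySem.List.index? l M with _ | q
  · exfalso
    have h1 := (PySem.List.index?_isSome_iff l M).mpr hMmem
    rw [hq] at h1
    simp at h1
  obtain ⟨hqlt, hlq, hfirst⟩ := PySem.List.getElem_of_index?_eq_some hq
  have hqm : q < m := by omega
  unfold has_mountain_aspect
  rw [hM]
  simp only [hq, PySem.List.len_eq, hlen]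
  rw [if_neg (by omega : ¬ m < 3)]
  constructor
  · -- A's test passed: recover the mountain shape, identify the peak with pvClimb
    intro h
    by_cases hq0 : q = 0 ∨ q = m - 1
    · rw [if_pos hq0] at h
      exact absurd h (by simp)
    rw [if_neg hq0] at h
    rw [Bool.and_eq_true] at h
    obtain ⟨h1, h2⟩ := h
    have hq1 : 1 ≤ q := by omega
    have hq2 : q + 2 ≤ m := by omega
    have hinc : ∀ k, i ≤ k → k < i + q → s.getD k 0 < s.getD (k + 1) 0 := by
      intro k hk1 hk2
      rcases Nat.lt_or_ge k (i + q - 1) with hcase | hcase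
      · have hmem : ((k - i + 1 : Nat) : Int) ∈ PySem.List.pyRange 1 (q : Int) := by
          rw [PySem.List.mem_pyRange_one]
          constructor
          · exact_mod_cast (by omega : 1 ≤ k - i + 1)
          · exact_mod_cast (by omega : k - i + 1 < q)
        have hstep := List.all_eq_true.mp h1 _ hmem
        simp only [Bool.not_eq_true', decide_eq_false_iff_not, not_le] at hstep
        have e1 : ((k - i + 1 : Nat) : Int) - 1 = ((k - i : Nat) : Int) := by omega
        rw [e1, PySem.List.pyGetD_natCast, PySem.List.pyGetD_natCast,
            hget (k - i) (by omega), hget (k - i + 1) (by omega)] at hstep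
        have e2 : i + (k - i) = k := by omega
        have e3 : i + (k - i + 1) = k + 1 := by omega
        rwa [e2, e3] at hstep
      · have hke : k = i + q - 1 := by omega
        have hq1lt : q - 1 < l.length := by omega
        have hne : l[q - 1] ≠ M := hfirst (q - 1) (by omega)
        have hle : l[q - 1] ≤ M := hMmax _ (List.getElem_mem hq1lt)
        have hlt : l[q - 1] < l[q] := by rw [hlq]; exact lt_of_le_of_ne hle hne
        rw [← List.getD_eq_getElem l 0 hq1lt, ← List.getD_eq_getElem l 0 hqlt,
            hget (q - 1) (by omega), hget q (by omega)] at hlt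
        have e2 : i + (q - 1) = k := by omega
        have e3 : i + q = k + 1 := by omega
        rwa [e2, e3] at hlt
    have hdec : ∀ k, i + q ≤ k → k < j → s.getD (k + 1) 0 < s.getD k 0 := by
      intro k hk1 hk2
      have hmem : ((k - i + 1 : Nat) : Int) ∈ PySem.List.pyRange ((q : Int) + 1) (m : Int) := by
        rw [PySem.List.mem_pyRange_one]
        constructor
        · have : q + 1 ≤ k - i + 1 := by omega
          push_cast
          omega
        · exact_mod_cast (by omega : k - i + 1 < m)
      have hstep := List.all_eq_true.mp h2 _ hmem
      simp only [Bool.not_eq_true', decide_eq_false_iff_not, not_le] at hstep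
      have e1 : ((k - i + 1 : Nat) : Int) - 1 = ((k - i : Nat) : Int) := by omega
      rw [e1, PySem.List.pyGetD_natCast, PySem.List.pyGetD_natCast,
          hget (k - i) (by omega), hget (k - i + 1) (by omega)] at hstep
      have e2 : i + (k - i) = k := by omega
      have e3 : i + (k - i + 1) = k + 1 := by omega
      rwa [e2, e3] at hstep
    have hun : i + q < n := by omega
    have hu : u = i + q := by
      rw [hudef]
      refine pvClimb_unique s n i (i + q) (by omega) hun hinc (fun hlt' hinc' => ?_)
      have := hdec (i + q) (le_refl _) (by omega)
      omega
    refine ⟨by omega, by omega, ?_⟩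
    rw [hu]
    exact pvDscLim_ge_of_dec s n (i + q) j (by omega) (by omega) hdec
  · -- the mountain shape makes A's max/index test succeed
    rintro ⟨hiu, huj, hjd⟩
    have hun : u < n := pvClimb_lt s n i (by omega)
    have habs_inc : ∀ k, i ≤ k → k < u → s.getD k 0 < s.getD (k + 1) 0 := pvClimb_inc s n i
    have habs_dec : ∀ k, u ≤ k → k < j → s.getD (k + 1) 0 < s.getD k 0 :=
      fun k hk1 hk2 => pvDscLim_dec s n u k hk1 (by omega)
    have hpeak : ∀ t, t < m → t ≠ u - i → l.getD t 0 < l.getD (u - i) 0 := by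
      intro t ht htne
      rw [hget t ht, hget (u - i) (by omega)]
      have e : i + (u - i) = u := by omega
      rw [e]
      rcases Nat.lt_or_ge (i + t) u with hc | hc
      · exact pvIncChain s i u habs_inc (i + t) (by omega) hc
      · exact pvDecChain s u j habs_dec (i + t) (by omega) (by omega)
    have hMval : M = l.getD (u - i) 0 := by
      obtain ⟨tm, htm, htme⟩ := List.getElem_of_mem hMmem
      by_cases hc : tm = u - i
      · subst hc
        rw [List.getD_eq_getElem l 0 htm]
        exact htme.symm
      · exfalso
        have h1 : l.getD tm 0 < l.getD (u - i) 0 := hpeak tm (by omega) hc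
        have h2 : l.getD (u - i) 0 ≤ M := hMmax _ (by
          rw [List.getD_eq_getElem l 0 (by omega : u - i < l.length)]
          exact List.getElem_mem _)
        rw [List.getD_eq_getElem l 0 (by omega : tm < l.length), htme] at h1
        omega
    have hqval : q = u - i := by
      by_contra hne
      have h2 : l.getD q 0 < l.getD (u - i) 0 := hpeak q hqm hne
      rw [List.getD_eq_getElem l 0 hqlt, hlq, hMval] at h2
      omega
    rw [if_neg (by omega : ¬ (q = 0 ∨ q = m - 1))]
    rw [Bool.and_eq_true]
    constructor
    · rw [List.all_eq_true]
      intro t htmem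
      rw [PySem.List.mem_pyRange_one] at htmem
      obtain ⟨ht1, ht2⟩ := htmem
      lift t to Nat using (by omega) with tn
      have htn1 : 1 ≤ tn := by exact_mod_cast ht1
      have htn2 : tn < q := by exact_mod_cast ht2
      simp only [Bool.not_eq_true', decide_eq_false_iff_not, not_le]
      have e1 : (tn : Int) - 1 = ((tn - 1 : Nat) : Int) := by omega
      rw [e1, PySem.List.pyGetD_natCast, PySem.List.pyGetD_natCast,
          hget (tn - 1) (by omega), hget tn (by omega)]
      have hstep := habs_inc (i + (tn - 1)) (by omega) (by omega)
      have e2 : i + (tn - 1) + 1 = i + tn := by omega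
      rwa [e2] at hstep
    · rw [List.all_eq_true]
      intro t htmem
      rw [PySem.List.mem_pyRange_one] at htmem
      obtain ⟨ht1, ht2⟩ := htmem
      lift t to Nat using (by omega) with tn
      have htn1 : q + 1 ≤ tn := by exact_mod_cast ht1
      have htn2 : tn < m := by exact_mod_cast ht2
      simp only [Bool.not_eq_true', decide_eq_false_iff_not, not_le]
      have e1 : (tn : Int) - 1 = ((tn - 1 : Nat) : Int) := by omega
      rw [e1, PySem.List.pyGetD_natCast, PySem.List.pyGetD_natCast,
          hget (tn - 1) (by omega), hget tn (by omega)]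
      have hstep := habs_dec (i + (tn - 1)) (by omega) (by omega)
      have e2 : i + (tn - 1) + 1 = i + tn := by omega
      rwa [e2] at hstep

theorem pvTakeSucc (s : List Int) (iN c : Nat) (hic : iN ≤ c) (hcl : c < s.length) :
    (s.drop iN).take (c - iN) ++ [s.getD c 0] = (s.drop iN).take (c + 1 - iN) := by
  have h1 : c + 1 - iN = (c - iN) + 1 := by omega
  rw [h1, List.take_add_one, List.getElem?_drop]
  have h2 : iN + (c - iN) = c := by omega
  rw [h2, List.getElem?_eq_getElem hcl, List.getD_eq_getElem s 0 hcl]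
  rfl

-- the inner j-loop of A from position c on, with the partial subarray s[iN:c] in hand
theorem pvInner (s : List Int) (iN : Nat) :
    ∀ d c, s.length - c = d → iN < c → c ≤ s.length → ∀ st : List (List Int),
    ((PySem.List.pyRange (c : Int) (s.length : Int) 1).foldl
      (fun (stp : List Int × List (List Int)) j =>
        let sub := stp.1 ++ [PySem.List.pyGetD s j 0]
        (sub, if 3 ≤ sub.length then stp.2 ++ [sub] else stp.2))
      ((s.drop iN).take (c - iN), st)).2
    = st ++ ((List.range' c (s.length - c)).filter (fun j => decide (iN + 2 ≤ j))).map
        (fun j => (s.drop iN).take (j + 1 - iN)) := by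
  intro d
  induction d with
  | zero =>
    intro c hd hic hcn st
    have hce : c = s.length := by omega
    rw [PySem.List.pyRange_one_eq_nil (by exact_mod_cast le_of_eq hce.symm)]
    simp [hce]
  | succ d ih =>
    intro c hd hic hcn st
    have hcl : c < s.length := by omega
    rw [PySem.List.pyRange_one_cons (by exact_mod_cast hcl)]
    simp only [List.foldl_cons, PySem.List.pyGetD_natCast]
    rw [List.getD_eq_getElem s 0 hcl] at *
    have hsub : (s.drop iN).take (c - iN) ++ [s[c]] = (s.drop iN).take (c + 1 - iN) := by
      rw [← List.getD_eq_getElem s 0 hcl]; exact pvTakeSucc s iN c (by omega) hcl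
    have hlensub : ((s.drop iN).take (c + 1 - iN)).length = c + 1 - iN :=
      pvTakeDropLen s iN (c + 1 - iN) (by omega)
    have hrange : s.length - c = d + 1 := hd
    rw [hrange, List.range'_succ, List.filter_cons]
    have hcast : (c : Int) + 1 = ((c + 1 : Nat) : Int) := by push_cast; ring
    by_cases hge : iN + 2 ≤ c
    · have h3 : 3 ≤ ((s.drop iN).take (c - iN) ++ [s[c]]).length := by
        rw [hsub, hlensub]; omega
      simp only [hsub, hlensub, if_pos (by omega : 3 ≤ c + 1 - iN), hcast]
      rw [ih (c + 1) (by omega) (by omega) (by omega) (st ++ [(s.drop iN).take (c + 1 - iN)])]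
      simp only [decide_eq_true_eq, if_pos hge, List.map_cons, List.append_assoc,
        List.singleton_append]
      have hd2 : s.length - (c + 1) = d := by omega
      rw [hd2]
    · have h3 : ¬ 3 ≤ c + 1 - iN := by omega
      simp only [hsub, hlensub, if_neg h3, hcast]
      rw [ih (c + 1) (by omega) (by omega) (by omega) st]
      simp only [decide_eq_true_eq, if_neg hge]
      have hd2 : s.length - (c + 1) = d := by omega
      rw [hd2]

-- A's stack, normalised
theorem pvA_eq (s : List Int) :
    generate_consecutive_subsequences_iterative_backtracking s
      = (List.range s.length).flatMap (fun i => (pvCand s i).filter has_mountain_aspect) := by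
  unfold generate_consecutive_subsequences_iterative_backtracking
  rw [PySem.List.foldl_pyRange_zero_pyGetD _ ([] : List Int)
        (fun acc x => if has_mountain_aspect x then acc ++ [x] else acc) []]
  rw [PySem.List.foldl_append_if_eq_filter]
  rw [List.nil_append]
  rw [show (List.range s.length).flatMap (fun i => (pvCand s i).filter has_mountain_aspect)
        = ((List.range s.length).flatMap (pvCand s)).filter has_mountain_aspect from
      (List.filter_flatMap).symm]
  congr 1
  -- the stack equals the flatMap of per-start candidate lists
  rw [PySem.List.len_eq, PySem.List.pyRange_zero_nat, List.foldl_map]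
  rw [PySem.List.foldl_congr_mem _ _ (fun stack iN => stack ++ pvCand s iN) _ ?_]
  · rw [PySem.List.foldl_append_eq_flatMap, List.nil_append]
  · intro acc iN hiN
    have hin : iN < s.length := List.mem_range.mp hiN
    have hstart : [PySem.List.pyGetD s (iN : Int) 0] = (s.drop iN).take (iN + 1 - iN) := by
      rw [PySem.List.pyGetD_natCast, List.getD_eq_getElem s 0 hin]
      have h1 : iN + 1 - iN = (iN - iN) + 1 := by omega
      rw [← List.getD_eq_getElem s 0 hin, ← pvTakeSucc s iN iN (le_refl iN) hin]
      simp
    have hcast : (iN : Int) + 1 = ((iN + 1 : Nat) : Int) := by push_cast; ring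
    simp only [hstart, hcast]
    rw [pvInner s iN (s.length - (iN + 1)) (iN + 1) rfl (by omega) (by omega) acc]
    congr 1
    unfold pvCand
    -- filter (iN+2 ≤ ·) over [iN+1, len) keeps exactly [iN+2, len)
    rcases Nat.lt_or_ge (iN + 1) s.length with hlt | hge
    · have : s.length - (iN + 1) = (s.length - (iN + 2)) + 1 := by omega
      rw [this, List.range'_succ, List.filter_cons]
      simp only [decide_eq_true_eq, if_neg (by omega : ¬ iN + 2 ≤ iN + 1)]
      rw [List.filter_eq_self.mpr]
      intro a ha
      have := List.mem_range'_1.mp ha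
      simp only [decide_eq_true_eq]
      omega
    · have h1 : s.length - (iN + 1) = 0 := by omega
      have h2 : s.length - (iN + 2) = 0 := by omega
      simp [h1, h2]

-- B, normalised
theorem pvB_eq (s : List Int) :
    generate_consecutive_subsequences_iterative_backtracking_alt s
      = (List.range s.length).flatMap (fun i =>
          let u := pvClimb s s.length i
          if u = i then []
          else (List.range' (u + 1) (pvDscLim s s.length u - u)).map
                 (fun j => (s.drop i).take (j + 1 - i))) := by
  unfold generate_consecutive_subsequences_iterative_backtracking_alt
  rw [PySem.List.foldl_congr_mem _ _ (fun results i =>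
        results ++ (if pvClimb s s.length i = i then []
          else (List.range' (pvClimb s s.length i + 1)
                  (pvDscLim s s.length (pvClimb s s.length i) - pvClimb s s.length i)).map
                 (fun j => (s.drop i).take (j + 1 - i)))) _ ?_]
  · rw [PySem.List.foldl_append_eq_flatMap, List.nil_append]
  · intro acc i hi
    by_cases h : pvClimb s s.length i = i
    · simp [h]
    · simp only [if_neg h]
      rw [pvDescend_spec]

theorem pvPerStart (s : List Int) (i : Nat) (hi : i < s.length) :
    (pvCand s i).filter has_mountain_aspect
      = (let u := pvClimb s s.length i
         if u = i then []
         else (List.range' (u + 1) (pvDscLim s s.length u - u)).map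
                (fun j => (s.drop i).take (j + 1 - i))) := by
  unfold pvCand
  rw [List.filter_map]
  rw [List.filter_congr (q := fun j => decide (i < pvClimb s s.length i ∧ pvClimb s s.length i < j
        ∧ j ≤ pvDscLim s s.length (pvClimb s s.length i))) ?_]
  · set u := pvClimb s s.length i with hu
    set d := pvDscLim s s.length u with hd
    by_cases h : u = i
    · simp only [if_pos h]
      rw [List.filter_eq_nil_iff.mpr, List.map_nil]
      intro a _
      simp only [decide_eq_true_eq, not_and]
      intro hlt
      omega
    · simp only [if_neg h]
      have hiu : i < u := lt_of_le_of_ne (pvClimb_ge s s.length i) (Ne.symm h)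
      have hun : u < s.length := pvClimb_lt s s.length i hi
      have hdu : u ≤ d := pvDscLim_ge s s.length u
      have hdn : d < s.length := pvDscLim_lt s s.length u hun
      have hsplit1 : List.range' (i + 2) (s.length - (i + 2))
          = List.range' (i + 2) (u + 1 - (i + 2))
            ++ List.range' (u + 1) ((d - u) + (s.length - (d + 1))) := by
        have h1 := List.range'_append (s := i + 2) (m := u + 1 - (i + 2))
          (n := (d - u) + (s.length - (d + 1))) (step := 1)
        rw [show i + 2 + 1 * (u + 1 - (i + 2)) = u + 1 by omega] at h1
        rw [show s.length - (i + 2) = u + 1 - (i + 2) + (d - u + (s.length - (d + 1))) by omega]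
        exact h1.symm
      have hsplit2 : List.range' (u + 1) ((d - u) + (s.length - (d + 1)))
          = List.range' (u + 1) (d - u) ++ List.range' (d + 1) (s.length - (d + 1)) := by
        have h1 := List.range'_append (s := u + 1) (m := d - u)
          (n := s.length - (d + 1)) (step := 1)
        rw [show u + 1 + 1 * (d - u) = d + 1 by omega] at h1
        exact h1.symm
      rw [hsplit1, hsplit2, List.filter_append, List.filter_append]
      rw [List.filter_eq_nil_iff.mpr (by
        intro a ha
        have := List.mem_range'_1.mp ha
        simp only [decide_eq_true_eq, not_and]
        intro _ hua
        omega)]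
      rw [List.filter_eq_self.mpr (by
        intro a ha
        have := List.mem_range'_1.mp ha
        simp only [decide_eq_true_eq]
        exact ⟨hiu, by omega, by omega⟩)]
      rw [List.filter_eq_nil_iff.mpr (by
        intro a ha
        have := List.mem_range'_1.mp ha
        simp only [decide_eq_true_eq, not_and]
        intro _ _
        omega)]
      simp only [List.append_nil, List.nil_append]
      rw [← hd]
  · intro a ha
    have hmem := List.mem_range'_1.mp ha
    rw [Bool.eq_iff_iff]
    simp only [Function.comp_apply, decide_eq_true_eq]
    exact pvHmIff s i a (by omega) (by omega)

-- ===== VERDICT (by name: the statement is the Claim_ definition above) =====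
theorem generate_consecutive_subsequences_iterative_backtracking_spec : Claim_equal_generate_consecutive_subsequences_iterative_backtracking := by
  intro s _
  unfold Spec_generate_consecutive_subsequences_iterative_backtracking
  rw [pvA_eq, pvB_eq]
  rw [List.flatMap_def, List.flatMap_def]
  exact congrArg List.flatten
    (List.map_congr_left (fun i hi => pvPerStart s i (List.mem_range.mp hi)))
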